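-- pv_equiv track=rewrite | github.com/tigranfah/table_extraction_from_docs | scripts/infer_utils.py | get_col_bboxes_count
-- ===== SOURCE A (Python) =====
-- def get_col_bboxes_count(bboxes):
--     cur = bboxes[0]
--     count = 1
--     max_x = cur[2]
--
--     for i in range(1, len(bboxes)):
--         cur = bboxes[i]
--         if cur[0] > max_x:
--             break
--         count += 1
--         max_x = min(max_x, cur[2])
--
--     return count
-- ===== SOURCE B (Python) =====
-- def get_col_bboxes_count(bboxes):
--     # prefix table of the running minimum of right edges
--     mins = [bboxes[0][2]]
--     for b in bboxes[1:]:
--         mins.append(min(mins[-1], b[2]))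
--     for i in range(1, len(bboxes)):
--         if bboxes[i][0] > mins[i - 1]:
--             return i
--     return len(bboxes)
-- ===== Notes on version B (the rewrite author's own statement) =====
-- stated objective: idiomatic
-- what changed: Replaces the fused running-min-plus-break loop carrying count/max_x state with a precomputed prefix table of running minima of right edges followed by a separate scan returning the first violating index.
-- outside the precondition, e.g. on get_col_bboxes_count([[0, 0, 5], [10]]): A returns 1, B raises IndexError
import Mathlib
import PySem

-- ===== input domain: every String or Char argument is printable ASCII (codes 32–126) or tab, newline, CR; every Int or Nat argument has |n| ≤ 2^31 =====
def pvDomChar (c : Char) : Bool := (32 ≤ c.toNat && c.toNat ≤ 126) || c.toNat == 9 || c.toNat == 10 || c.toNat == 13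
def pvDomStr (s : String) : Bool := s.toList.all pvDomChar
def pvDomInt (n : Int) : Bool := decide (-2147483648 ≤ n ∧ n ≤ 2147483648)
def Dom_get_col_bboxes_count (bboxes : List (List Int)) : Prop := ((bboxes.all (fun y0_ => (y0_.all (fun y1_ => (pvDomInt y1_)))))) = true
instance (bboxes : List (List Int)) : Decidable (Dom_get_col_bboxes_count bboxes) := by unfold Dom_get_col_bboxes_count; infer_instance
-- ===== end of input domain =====

-- B replaces A's fused running-min-plus-break loop with a prefix table of running minima plus a separate first-violation scan (same cost, different decomposition); equivalence is about the return value (neither mutates its argument).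

-- ===== PORT A =====
-- the 'for i in range(1, len(bboxes))' loop with its break, carrying count and max_x
def pvALoop (bboxes : List (List Int)) (i : Nat) (count max_x : Int) : Int :=
  if _h : i < bboxes.length then
    let cur := PySem.List.pyGetD bboxes (i : Int) []
    if PySem.List.pyGetD cur 0 0 > max_x then count
    else pvALoop bboxes (i + 1) (count + 1) (min max_x (PySem.List.pyGetD cur 2 0))
  else count
termination_by bboxes.length - i

def get_col_bboxes_count (bboxes : List (List Int)) : Int :=
  let cur := PySem.List.pyGetD bboxes 0 []
  pvALoop bboxes 1 1 (PySem.List.pyGetD cur 2 0)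

-- ===== PORT B =====
-- first loop of B: build the prefix table mins by appending min(mins[-1], b[2])
def pvBMins (rest : List (List Int)) (mins : List Int) : List Int :=
  match rest with
  | [] => mins
  | b :: t => pvBMins t (mins ++ [min (PySem.List.pyGetD mins (-1) 0) (PySem.List.pyGetD b 2 0)])

-- second loop of B: first i in range(1, len) with bboxes[i][0] > mins[i-1]
def pvBScan (bboxes : List (List Int)) (mins : List Int) (i : Nat) : Int :=
  if _h : i < bboxes.length then
    if PySem.List.pyGetD (PySem.List.pyGetD bboxes (i : Int) []) 0 0 > PySem.List.pyGetD mins ((i : Int) - 1) 0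
    then (i : Int)
    else pvBScan bboxes mins (i + 1)
  else (bboxes.length : Int)
termination_by bboxes.length - i

def get_col_bboxes_count_alt (bboxes : List (List Int)) : Int :=
  let mins := pvBMins (PySem.List.slice bboxes (some 1) none)
                      [PySem.List.pyGetD (PySem.List.pyGetD bboxes 0 []) 2 0]
  pvBScan bboxes mins 1

-- ===== PRECONDITION & SPEC =====
-- Pre_ excludes the empty list (A raises IndexError) and lists containing a bbox with fewer than 3
-- coordinates: on most of those A raises IndexError too, but A happens to return on some of them when
-- the short bbox sits at or after the break index — an accident of the scan position — and B's
-- prefix-table pass raises IndexError there.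
def Pre_get_col_bboxes_count (bboxes : List (List Int)) : Prop :=
  bboxes ≠ [] ∧ ∀ b ∈ bboxes, 3 ≤ b.length
instance (bboxes : List (List Int)) : Decidable (Pre_get_col_bboxes_count bboxes) := by
  unfold Pre_get_col_bboxes_count; infer_instance

def pvWitness_get_col_bboxes_count : List (List Int) := [[0, 0, 5], [1, 0, 4], [10, 0, 9]]

def Spec_get_col_bboxes_count (bboxes : List (List Int)) (out : Int) : Prop := out = get_col_bboxes_count_alt bboxes
instance (bboxes : List (List Int)) (out : Int) : Decidable (Spec_get_col_bboxes_count bboxes out) := by unfold Spec_get_col_bboxes_count; infer_instance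

-- ===== CLAIM (what is proved, stated in full; the proofs are below) =====
def Claim_equal_get_col_bboxes_count : Prop := ∀ (bboxes : List (List Int)), Dom_get_col_bboxes_count bboxes → Pre_get_col_bboxes_count bboxes → Spec_get_col_bboxes_count bboxes (get_col_bboxes_count bboxes)

-- ===== LEMMAS AND PROOFS =====

-- the running-min continuation the mins table carries after its seed
def pvTail (m : Int) : List (List Int) → List Int
  | [] => []
  | b :: t => min m (PySem.List.pyGetD b 2 0) :: pvTail (min m (PySem.List.pyGetD b 2 0)) t

lemma pvBMins_eq (rest : List (List Int)) :
    ∀ (acc : List Int) (m : Int), acc.getLast? = some m →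
      pvBMins rest acc = acc ++ pvTail m rest := by
  induction rest with
  | nil => intro acc m _; simp [pvBMins, pvTail]
  | cons b t ih =>
    intro acc m hm
    have hne : acc ≠ [] := by rintro rfl; simp at hm
    have hlast : PySem.List.pyGetD acc (-1) 0 = m := by
      rw [PySem.List.pyGetD_neg_one acc 0 hne]
      rw [List.getLast?_eq_some_getLast hne] at hm
      exact Option.some_injective _ hm
    rw [pvBMins, hlast,
        ih (acc ++ [min m (PySem.List.pyGetD b 2 0)]) (min m (PySem.List.pyGetD b 2 0)) (by simp)]
    simp [pvTail]

lemma pvScan_eq (rest : List (List Int)) :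
    ∀ (bb : List (List Int)) (mins : List Int) (i : Nat) (m : Int),
      bb.drop i = rest → mins.drop (i - 1) = m :: pvTail m rest →
      1 ≤ i → mins.length = bb.length →
      pvALoop bb i (i : Int) m = pvBScan bb mins i := by
  induction rest with
  | nil =>
    intro bb mins i m hdrop hmins h1 hlen
    have hle : bb.length ≤ i := by
      have := congrArg List.length hdrop; simp at this; omega
    have hlt : i - 1 < mins.length := by
      have := congrArg List.length hmins; simp at this; omega
    have hi : i = bb.length := by omega
    rw [pvALoop, pvBScan]
    simp [hi]
  | cons b t ih =>
    intro bb mins i m hdrop hmins h1 hlen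
    have hlt : i < bb.length := by
      by_contra h
      rw [List.drop_eq_nil_of_le (by omega)] at hdrop; exact (by simp at hdrop)
    have hb : bb[i] = b := by
      have := List.getElem_drop (xs := bb) (i := i) (j := 0) (h := by rw [hdrop]; simp)
      simp [hdrop] at this; exact this.symm
    have hbbi : PySem.List.pyGetD bb (i : Int) [] = b := by
      rw [PySem.List.pyGetD_natCast]; simp [List.getD, hlt, hb]
    have hm1lt : i - 1 < mins.length := by
      have := congrArg List.length hmins; simp at this; omega
    have hminsm : PySem.List.pyGetD mins ((i : Int) - 1) 0 = m := by
      have hc : ((i : Int) - 1) = ((i - 1 : Nat) : Int) := by omega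
      rw [hc, PySem.List.pyGetD_natCast]
      have : mins[i-1] = m := by
        have := List.getElem_drop (xs := mins) (i := i - 1) (j := 0) (h := by simp [hmins])
        simp [hmins] at this; exact this.symm
      simp [List.getD, hm1lt, this]
    rw [pvALoop, pvBScan]
    simp only [hlt, dif_pos, hbbi, hminsm]
    by_cases hgt : PySem.List.pyGetD b 0 0 > m
    · simp [hgt]
    · simp only [hgt, if_false]
      have hdrop' : bb.drop (i + 1) = t := by
        rw [← List.drop_drop (j := i) (i := 1), hdrop]; simp
      have hmins' : mins.drop ((i + 1) - 1) = min m (PySem.List.pyGetD b 2 0) :: pvTail (min m (PySem.List.pyGetD b 2 0)) t := by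
        have : mins.drop i = (mins.drop (i - 1)).drop 1 := by
          rw [List.drop_drop]; congr 1; omega
        simp only [Nat.add_sub_cancel, this, hmins, pvTail, List.drop_one, List.tail_cons]
      have := ih bb mins (i + 1) (min m (PySem.List.pyGetD b 2 0)) hdrop' hmins' (by omega) hlen
      rw [← this]; push_cast; ring_nf

-- ===== VERDICT (by name: the statement is the Claim_ definition above) =====
theorem get_col_bboxes_count_spec : Claim_equal_get_col_bboxes_count := by
  intro bboxes _hdom hpre
  obtain ⟨hne, _hlen⟩ := hpre
  obtain ⟨b0, rest, rfl⟩ := List.exists_cons_of_ne_nil hne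
  unfold Spec_get_col_bboxes_count get_col_bboxes_count get_col_bboxes_count_alt
  rw [PySem.List.slice_from_one]
  simp only [List.tail_cons]
  have hseed : PySem.List.pyGetD (b0 :: rest) 0 [] = b0 := PySem.List.pyGetD_zero_cons ..
  rw [hseed, pvBMins_eq rest [PySem.List.pyGetD b0 2 0] (PySem.List.pyGetD b0 2 0) (by simp)]
  apply pvScan_eq rest (b0 :: rest) _ 1 (PySem.List.pyGetD b0 2 0)
  · simp
  · simp
  · omega
  · have hpt : ∀ (m : Int) (l : List (List Int)), (pvTail m l).length = l.length := by
      intro m l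
      induction l generalizing m with
      | nil => simp [pvTail]
      | cons b t ih => simp [pvTail, ih]
    simp [hpt]
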